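-- pv_equiv track=rewrite | github.com/RThomas96/AnkiMarkdownImporter | myaddon/geodeDatabase.py | extractTagsFromMarkdownQuestion
-- ===== SOURCE A (Python) =====
-- def extractTagsFromMarkdownQuestion(question_with_tags):
--     # It is possible to '#' in the question if this is code !!
--     markerInCode = "`" in question_with_tags
--     if markerInCode:
--         question_no_code = question_with_tags.split("`")
--         tags = question_no_code[-1].split('#')
--     else:
--         tags = question_with_tags.split('#')
--
--     tags = [t for t in tags if t] #Remove empty strings
--     tags = [t.strip() for t in tags]
--     if not tags:
--         return [], []
--     question = tags[0]
--     if markerInCode: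
--         question = "`".join(question_no_code[:-1])+"`"+question
--     tags = tags[1:]
--     return question, tags
-- ===== SOURCE B (Python) =====
-- def extractTagsFromMarkdownQuestion(question_with_tags):
--     # Single reverse character scan: walk from the end, accumulating the current
--     # '#'-delimited piece; a '#' finalises a piece, the first '`' stops the scan
--     # (everything up to and including it is the untouched question prefix).
--     s = question_with_tags
--     prefix = ''
--     cur = []            # chars of the pending piece, in scan (right-to-left) order
--     rev_pieces = []
--     for i in range(len(s) - 1, -1, -1):
--         c = s[i]
--         if c == '`':
--             prefix = s[:i + 1]
--             break
--         if c == '#':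
--             rev_pieces.append(''.join(reversed(cur)))
--             cur = []
--         else:
--             cur.append(c)
--     rev_pieces.append(''.join(reversed(cur)))
--     parts = [p.strip() for p in reversed(rev_pieces) if p]
--     if not parts:
--         return [], []
--     return prefix + parts[0], parts[1:]
-- ===== Notes on version B (the rewrite author's own statement) =====
-- stated objective: alternative
-- what changed: A single reverse character scan with a piece accumulator replaces A's split('`')/split('#')/filter/strip/join pipeline: one pass locates the last backtick, collects the '#'-delimited pieces and the question prefix simultaneously, with no intermediate split lists and no flag.
-- outside the precondition, e.g. on extractTagsFromMarkdownQuestion('`##'): A returns ([], []), B returns ([], []); on extractTagsFromMarkdownQuestion('#'): A returns ([], []), B returns ([], []); on extractTagsFromMarkdownQuestion('`'): A returns ([], []), B returns ([], [])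
import Mathlib
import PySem

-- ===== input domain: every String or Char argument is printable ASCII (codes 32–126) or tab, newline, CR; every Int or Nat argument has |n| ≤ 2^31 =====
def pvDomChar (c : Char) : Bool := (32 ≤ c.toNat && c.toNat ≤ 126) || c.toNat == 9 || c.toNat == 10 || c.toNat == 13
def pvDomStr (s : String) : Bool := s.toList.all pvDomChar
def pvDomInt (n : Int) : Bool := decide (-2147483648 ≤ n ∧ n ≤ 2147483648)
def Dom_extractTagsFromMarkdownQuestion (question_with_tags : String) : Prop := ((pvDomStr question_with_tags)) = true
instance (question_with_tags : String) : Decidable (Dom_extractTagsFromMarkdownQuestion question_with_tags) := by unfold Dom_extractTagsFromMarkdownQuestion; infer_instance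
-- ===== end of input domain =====

-- B replaces A's split/filter/strip/join pipeline by one reverse character scan with an accumulator
-- (alternative decomposition, same cost).


-- ===== PORT A =====
def extractTagsFromMarkdownQuestion (question_with_tags : String) : String × List String :=
  let s := question_with_tags.toList
  let markerInCode := PySem.Chars.isIn ['`'] s                     -- "`" in question_with_tags
  let question_no_code := PySem.Chars.splitOn s ['`']              -- question_with_tags.split("`")
  let tags :=
    if markerInCode then
      PySem.Chars.splitOn ((PySem.List.pyGet? question_no_code (-1)).getD []) ['#']
        -- question_no_code[-1].split('#'); the [-1] never raises (split is nonempty), getD only totalises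
    else
      PySem.Chars.splitOn s ['#']
  let tags := tags.filter (fun t => !t.isEmpty)                    -- [t for t in tags if t]
  let tags := tags.map PySem.Chars.strip                           -- [t.strip() for t in tags]
  match tags with
  | [] => ("", [])                                                 -- Python: return [], [] (two lists; outside Pre_)
  | q0 :: rest =>
    let question :=
      if markerInCode then
        PySem.Chars.join ['`'] (PySem.List.slice question_no_code none (some (-1))) ++ ['`'] ++ q0
      else q0
    (String.ofList question, rest.map String.ofList)

-- ===== PORT B =====
/-- The reverse scan of Source B's for-loop, step for step. First argument is the remaining
    reversed input (so its head is the current character `s[i]`); `cur` is the pending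
    piece: Source B appends chars in right-to-left scan order and reads `reversed(cur)`,
    which consing (`c :: cur`) maintains directly; likewise the piece list is consed,
    i.e. kept in the `reversed(rev_pieces)` order Source B's comprehension reads; the final
    `rev_pieces.append(...)` after the loop/break is the `cur :: _` in the two stop cases.
    On break at `'`'`, `s[:i+1]` is exactly the reverse of the remaining reversed input. -/
def pvScan : List Char → List Char → List (List Char) → List Char × List (List Char)
  | [], cur, pieces => ([], cur :: pieces)
  | c :: rest, cur, pieces =>
    if c = '`' then ((c :: rest).reverse, cur :: pieces)           -- prefix = s[:i+1]; break
    else if c = '#' then pvScan rest [] (cur :: pieces)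
    else pvScan rest (c :: cur) pieces

def extractTagsFromMarkdownQuestion_alt (question_with_tags : String) : String × List String :=
  let s := question_with_tags.toList
  let scanned := pvScan s.reverse [] []                            -- the for-loop over range(len(s)-1,-1,-1)
  let parts := scanned.2.filterMap
      (fun p => if p.isEmpty then none else some (PySem.Chars.strip p))  -- [p.strip() for p in reversed(rev_pieces) if p]
  match parts with
  | [] => ("", [])                                                 -- Python: return [], [] (outside Pre_)
  | q0 :: ts => (String.ofList (scanned.1 ++ q0), ts.map String.ofList)

-- ===== PRECONDITION & SPEC =====
-- Pre_ excludes exactly the inputs whose text after the last backtick (the whole string if there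
-- is none) consists only of '#' characters, possibly zero of them: there Python A returns
-- ([], []) — a pair of two LISTS, not a value of the declared (str, list[str]) type — and B
-- returns the same pair, so only the typed claim must exclude them.
def Pre_extractTagsFromMarkdownQuestion (question_with_tags : String) : Prop :=
  ((question_with_tags.toList.reverse.takeWhile (· ≠ '`')).any (· ≠ '#')) = true
instance (question_with_tags : String) : Decidable (Pre_extractTagsFromMarkdownQuestion question_with_tags) := by
  unfold Pre_extractTagsFromMarkdownQuestion; infer_instance

def pvWitness_extractTagsFromMarkdownQuestion : String := "what is `x` ? #math #easy"

def Spec_extractTagsFromMarkdownQuestion (question_with_tags : String) (out : String × List String) : Prop := out = extractTagsFromMarkdownQuestion_alt question_with_tags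
instance (question_with_tags : String) (out : String × List String) : Decidable (Spec_extractTagsFromMarkdownQuestion question_with_tags out) := by unfold Spec_extractTagsFromMarkdownQuestion; infer_instance

-- ===== CLAIM (what is proved, stated in full; the proofs are below) =====
def Claim_equal_extractTagsFromMarkdownQuestion : Prop := ∀ (question_with_tags : String), Dom_extractTagsFromMarkdownQuestion question_with_tags → Pre_extractTagsFromMarkdownQuestion question_with_tags → Spec_extractTagsFromMarkdownQuestion question_with_tags (extractTagsFromMarkdownQuestion question_with_tags)

-- ===== LEMMAS AND PROOFS =====

/-- Structural characterisation of single-character split: head piece and tail pieces. -/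
def pvSplit1 (c : Char) : List Char → List Char × List (List Char)
  | [] => ([], [])
  | a :: t =>
    let p := pvSplit1 c t
    if a = c then ([], p.1 :: p.2) else (a :: p.1, p.2)

theorem pvSplit1_go (c : Char) (fuel : Nat) :
    ∀ (l cur : List Char) (acc : List (List Char)), l.length ≤ fuel →
      PySem.Chars.splitOn.go [c] fuel l cur acc
        = acc.reverse ++ (cur.reverse ++ (pvSplit1 c l).1) :: (pvSplit1 c l).2 := by
  induction fuel with
  | zero =>
    intro l cur acc h
    have : l = [] := List.eq_nil_of_length_eq_zero (Nat.le_zero.mp h)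
    subst this
    simp [PySem.Chars.splitOn.go, pvSplit1]
  | succ n ih =>
    intro l cur acc h
    cases l with
    | nil => simp [PySem.Chars.splitOn.go, pvSplit1]
    | cons a t =>
      by_cases hc : a = c
      · subst hc
        have hpre : [a].isPrefixOf (a :: t) = true := by simp [List.isPrefixOf]
        rw [PySem.Chars.splitOn.go]
        simp only [hpre, if_pos, List.length_cons, List.length_nil, Nat.zero_add,
          List.drop_succ_cons, List.drop_zero]
        rw [ih t [] (cur.reverse :: acc) (by simpa using Nat.le_of_succ_le_succ h)]
        simp [pvSplit1]
      · have hpre : [c].isPrefixOf (a :: t) = false := by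
          simp [List.isPrefixOf]
          exact fun hh => (hc hh.symm).elim
        rw [PySem.Chars.splitOn.go]
        simp only [hpre]
        rw [ih t (a :: cur) acc (by simpa using Nat.le_of_succ_le_succ h)]
        simp [pvSplit1, hc]

theorem pvSplitOn_eq (c : Char) (l : List Char) :
    PySem.Chars.splitOn l [c] = (pvSplit1 c l).1 :: (pvSplit1 c l).2 := by
  rw [PySem.Chars.splitOn, pvSplit1_go c (l.length + 1) l [] [] (by omega)]
  simp

/-- Detect the last separator: `none` means the separator is absent. -/
def pvRpart (c : Char) : List Char → Option (List Char × List Char)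
  | [] => none
  | a :: t =>
    match pvRpart c t with
    | some (pre, rest) => some (a :: pre, rest)
    | none => if a = c then some ([], t) else none

theorem pvRpart_none_iff (c : Char) (l : List Char) : pvRpart c l = none ↔ c ∉ l := by
  induction l with
  | nil => simp [pvRpart]
  | cons a t ih =>
    rw [pvRpart]
    cases ht : pvRpart c t with
    | some p => simp [ht] at ih ⊢; exact fun _ => ih
    | none =>
      simp [ht] at ih ⊢
      by_cases hc : a = c <;> simp [hc, ih]
      intro hh; exact (hc hh.symm).elim

theorem pvRpart_some (c : Char) (l : List Char) : ∀ (pre rest : List Char), pvRpart c l = some (pre, rest) →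
    l = pre ++ c :: rest ∧ c ∉ rest := by
  induction l with
  | nil => intro pre rest h; simp [pvRpart] at h
  | cons a t ih =>
    intro pre rest h
    rw [pvRpart] at h
    cases ht : pvRpart c t with
    | some p =>
      rw [ht] at h
      obtain ⟨p1, p2⟩ := p
      simp at h
      obtain ⟨h1, h2⟩ := h
      obtain ⟨e1, e2⟩ := ih p1 p2 ht
      subst h2
      constructor
      · rw [← h1]; simp [e1]
      · exact e2
    | none =>
      rw [ht] at h
      by_cases hc : a = c
      · simp [hc] at h
        obtain ⟨h1, h2⟩ := h
        subst hc; subst h1; subst h2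
        exact ⟨rfl, (pvRpart_none_iff _ t).mp ht⟩
      · simp [hc] at h

theorem pvSplit1_no_sep (c : Char) (l : List Char) (h : c ∉ l) : pvSplit1 c l = (l, []) := by
  induction l with
  | nil => rfl
  | cons a t ih =>
    simp at h
    rw [pvSplit1, ih h.2]
    simp [Ne.symm h.1]

theorem pvSplit1_append_sep (c : Char) (a b : List Char) (hb : c ∉ b) :
    pvSplit1 c (a ++ c :: b) = ((pvSplit1 c a).1, (pvSplit1 c a).2 ++ [b]) := by
  induction a with
  | nil =>
    simp only [List.nil_append]
    simp [pvSplit1, pvSplit1_no_sep c b hb]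
  | cons y ys ih =>
    rw [List.cons_append, pvSplit1, ih, pvSplit1]
    by_cases hy : y = c <;> simp [hy]

theorem pvJoin_cons_head (sep a : List Char) (h : List Char) (xs : List (List Char)) :
    PySem.Chars.join sep ((a ++ h) :: xs) = a ++ PySem.Chars.join sep (h :: xs) := by
  cases xs <;> simp [PySem.Chars.join, List.intercalate, List.intersperse]

theorem pvSplit1_decomp (c : Char) (rest : List Char) (h : c ∉ rest) :
    ∀ pre : List Char, ∃ H T, pvSplit1 c (pre ++ c :: rest) = (H, T ++ [rest]) ∧
      PySem.Chars.join [c] (H :: T) = pre := by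
  intro pre
  induction pre with
  | nil =>
    refine ⟨[], [], ?_, ?_⟩
    · simp [pvSplit1, pvSplit1_no_sep c rest h]
    · exact PySem.Chars.join_singleton [c] []
  | cons a p ih =>
    obtain ⟨H, T, e1, e2⟩ := ih
    by_cases hc : a = c
    · refine ⟨[], H :: T, ?_, ?_⟩
      · rw [List.cons_append, pvSplit1, e1]
        simp [hc]
      · rw [PySem.Chars.join_cons_cons, e2, hc]
        rfl
    · refine ⟨a :: H, T, ?_, ?_⟩
      · rw [List.cons_append, pvSplit1, e1]
        simp [hc]
      · rw [show (a :: H) :: T = (([a] : List Char) ++ H) :: T from rfl, pvJoin_cons_head, e2]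
        rfl

theorem pvFilterMap_eq (ps : List (List Char)) :
    ps.filterMap (fun t => if t.isEmpty then none else some (PySem.Chars.strip t))
      = (ps.filter (fun t => !t.isEmpty)).map PySem.Chars.strip := by
  induction ps with
  | nil => rfl
  | cons p t ih =>
    rcases p with _ | ⟨x, xs⟩ <;> simp <;> simpa using ih

theorem pvIsIn_singleton (c : Char) (l : List Char) : PySem.Chars.isIn [c] l = true ↔ c ∈ l := by
  rw [PySem.Chars.isIn_iff_infix]
  exact List.singleton_infix_iff c l

/-- Scan characterisation, no backtick in `r`: scanning `r` (reversed) with pending piece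
    `cur` yields no prefix and exactly the '#'-split pieces of `r ++ cur`. -/
theorem pvScan_no_tick (r : List Char) (hr : '`' ∉ r) :
    ∀ cur pieces, '#' ∉ cur →
      pvScan r.reverse cur pieces
        = ([], (pvSplit1 '#' (r ++ cur)).1 :: ((pvSplit1 '#' (r ++ cur)).2 ++ pieces)) := by
  induction r using List.reverseRecOn with
  | nil =>
    intro cur pieces hc
    simp [pvScan, pvSplit1_no_sep '#' cur hc]
  | append_singleton xs x ih =>
    intro cur pieces hc
    simp only [List.mem_append, List.mem_singleton, not_or] at hr
    have hx : x ≠ '`' := Ne.symm hr.2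
    rw [List.reverse_append, List.reverse_singleton, List.singleton_append, pvScan]
    by_cases hxh : x = '#'
    · subst hxh
      simp only [if_neg hx]
      rw [ih hr.1 [] (cur :: pieces) (by simp)]
      have hs : pvSplit1 '#' (xs ++ '#' :: cur)
          = ((pvSplit1 '#' xs).1, (pvSplit1 '#' xs).2 ++ [cur]) :=
        pvSplit1_append_sep '#' xs cur hc
      simp [hs]
    · simp only [if_neg hx, if_neg hxh]
      rw [ih hr.1 (x :: cur) pieces
        (by simp only [List.mem_cons, not_or]; exact ⟨fun h => hxh h.symm, hc⟩)]
      simp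

/-- Scan characterisation, break case: the part after the last backtick is `r` ('`' ∉ r);
    the scan stops at the backtick, returning `s[:i+1]` and the pieces of `r ++ cur`. -/
theorem pvScan_tick (r : List Char) (hr : '`' ∉ r) (prev : List Char) :
    ∀ cur pieces, '#' ∉ cur →
      pvScan (r.reverse ++ '`' :: prev) cur pieces
        = (('`' :: prev).reverse,
           (pvSplit1 '#' (r ++ cur)).1 :: ((pvSplit1 '#' (r ++ cur)).2 ++ pieces)) := by
  induction r using List.reverseRecOn with
  | nil =>
    intro cur pieces hc
    rw [List.reverse_nil, List.nil_append, pvScan]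
    simp [pvSplit1_no_sep '#' cur hc]
  | append_singleton xs x ih =>
    intro cur pieces hc
    simp only [List.mem_append, List.mem_singleton, not_or] at hr
    have hx : x ≠ '`' := Ne.symm hr.2
    rw [List.reverse_append, List.reverse_singleton, List.singleton_append, List.cons_append, pvScan]
    by_cases hxh : x = '#'
    · subst hxh
      simp only [if_neg hx]
      rw [ih hr.1 [] (cur :: pieces) (by simp)]
      have hs : pvSplit1 '#' (xs ++ '#' :: cur)
          = ((pvSplit1 '#' xs).1, (pvSplit1 '#' xs).2 ++ [cur]) :=
        pvSplit1_append_sep '#' xs cur hc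
      simp [hs]
    · simp only [if_neg hx, if_neg hxh]
      rw [ih hr.1 (x :: cur) pieces
        (by simp only [List.mem_cons, not_or]; exact ⟨fun h => hxh h.symm, hc⟩)]
      simp

theorem pvMain_eq (q : String) :
    extractTagsFromMarkdownQuestion q = extractTagsFromMarkdownQuestion_alt q := by
  unfold extractTagsFromMarkdownQuestion extractTagsFromMarkdownQuestion_alt
  cases hr : pvRpart '`' q.toList with
  | none =>
    have hnotin : '`' ∉ q.toList := (pvRpart_none_iff _ _).mp hr
    have hm : PySem.Chars.isIn ['`'] q.toList = false := by
      rw [← Bool.not_eq_true, pvIsIn_singleton]; exact hnotin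
    have hscan := pvScan_no_tick q.toList hnotin [] [] (by simp)
    simp only [hm, Bool.false_eq_true, if_false, hscan, List.append_nil, pvFilterMap_eq,
      pvSplitOn_eq '#' q.toList]
    cases ((pvSplit1 '#' q.toList).1 :: (pvSplit1 '#' q.toList).2).filter
        (fun t => !t.isEmpty) |>.map PySem.Chars.strip with
    | nil => simp
    | cons q0 rest => simp
  | some pr =>
    obtain ⟨p, r⟩ := pr
    obtain ⟨hdec, hnr⟩ := pvRpart_some '`' q.toList p r hr
    have hm : PySem.Chars.isIn ['`'] q.toList = true := by
      rw [pvIsIn_singleton, hdec]; simp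
    obtain ⟨H, T, e1, e2⟩ := pvSplit1_decomp '`' r hnr p
    have hsplit : PySem.Chars.splitOn q.toList ['`'] = H :: (T ++ [r]) := by
      rw [hdec, pvSplitOn_eq, e1]
    have hlast : (PySem.List.pyGet? (H :: (T ++ [r])) (-1)).getD [] = r := by
      rw [PySem.List.pyGet?_neg_one, show H :: (T ++ [r]) = (H :: T) ++ [r] from rfl,
        List.getLast?_concat]
      rfl
    have hdrop : PySem.List.slice (H :: (T ++ [r])) none (some (-1)) = H :: T := by
      rw [PySem.List.slice_to_neg_one]
      rw [show H :: (T ++ [r]) = (H :: T) ++ [r] from rfl]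
      exact List.dropLast_concat ..
    have hrev : q.toList.reverse = r.reverse ++ '`' :: p.reverse := by
      rw [hdec]; simp
    have hscan := pvScan_tick r hnr p.reverse [] [] (by simp)
    simp only [hm, if_pos, hsplit, hlast, hdrop, e2, hrev, hscan, List.append_nil,
      pvFilterMap_eq, pvSplitOn_eq '#' r]
    cases ((pvSplit1 '#' r).1 :: (pvSplit1 '#' r).2).filter
        (fun t => !t.isEmpty) |>.map PySem.Chars.strip with
    | nil => simp
    | cons q0 rest => simp

-- ===== VERDICT (by name: the statement is the Claim_ definition above) =====
theorem extractTagsFromMarkdownQuestion_spec : Claim_equal_extractTagsFromMarkdownQuestion := by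
  intro q _ _
  exact pvMain_eq q
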